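-- pv_equiv track=rewrite | github.com/wangru25/VARIANT | src/utils/mutation_utils.py | detect_hot_mutation
-- ===== SOURCE A (Python) =====
-- def detect_hot_mutation(original_seq: str, mutated_seq: str) -> bool:
--     '''
--     Detect if a mutation is a hot mutation (exactly 2 substitutions flanking exactly 1 conserved base).
--
--     Args:
--         original_seq (str): Original nucleotide sequence.
--         mutated_seq (str): Mutated nucleotide sequence.
--
--     Returns:
--         bool: True if it's a hot mutation, False otherwise.
--     '''
--     if len(original_seq) != len(mutated_seq):
--         return False
--
--     # Find all positions where nucleotides differ
--     substitutions = []
--     for i, (orig, mut) in enumerate(zip(original_seq, mutated_seq)):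
--         if orig != mut:
--             substitutions.append(i)
--
--     # Hot mutation requires exactly 2 substitutions
--     if len(substitutions) != 2:
--         return False
--
--     # Check if there's exactly 1 conserved base between the two substitutions
--     pos1, pos2 = substitutions[0], substitutions[1]
--
--     # For hot mutation, the two substitutions should be at positions 0 and 2 (flanking position 1)
--     # This means the sequence should be 3 nucleotides long with the middle one conserved
--     if len(original_seq) == 3 and pos1 == 0 and pos2 == 2:
--         # Check if the middle position (position 1) is conserved
--         return original_seq[1] == mutated_seq[1]
--
--     # For other cases, count conserved bases between the two substitution positions
--     conserved_count = 0
--     for i in range(pos1 + 1, pos2):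
--         if original_seq[i] == mutated_seq[i]:
--             conserved_count += 1
--
--     # Hot mutation has exactly 1 conserved base between substitutions
--     return conserved_count == 1
-- ===== SOURCE B (Python) =====
-- def detect_hot_mutation(original_seq: str, mutated_seq: str) -> bool:
--     '''Hot mutation = exactly two substitutions flanking exactly one
--     conserved base; since the two recorded positions are the only
--     differences, that is exactly a gap of 2 between them.'''
--     if len(original_seq) != len(mutated_seq):
--         return False
--     diffs = [i for i, (a, b) in enumerate(zip(original_seq, mutated_seq)) if a != b]
--     return len(diffs) == 2 and diffs[1] - diffs[0] == 2
-- ===== Notes on version B (the rewrite author's own statement) =====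
-- stated objective: simpler
-- what changed: Replaced A's inner conserved-base counting loop and its length-3 special case with the closed-form test that the two substitution indices are exactly two apart (every base strictly between the only two differing positions is necessarily conserved).
import Mathlib
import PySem

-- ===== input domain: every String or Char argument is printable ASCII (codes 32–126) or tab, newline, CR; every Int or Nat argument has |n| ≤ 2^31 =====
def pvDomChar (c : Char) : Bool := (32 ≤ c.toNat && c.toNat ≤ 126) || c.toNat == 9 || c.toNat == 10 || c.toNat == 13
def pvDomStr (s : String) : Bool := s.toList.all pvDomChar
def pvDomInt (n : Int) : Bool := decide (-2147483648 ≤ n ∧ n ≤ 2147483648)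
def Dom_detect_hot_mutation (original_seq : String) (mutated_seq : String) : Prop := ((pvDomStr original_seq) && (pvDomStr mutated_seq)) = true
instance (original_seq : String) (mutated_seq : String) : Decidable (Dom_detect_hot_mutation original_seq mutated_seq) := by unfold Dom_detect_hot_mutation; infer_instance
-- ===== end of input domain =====

-- B replaces A's inner conserved-counting loop and its length-3 special case by the
-- closed-form gap test `diffs[1] - diffs[0] == 2` (simpler; same asymptotic cost).

-- ===== PORT A =====
def detect_hot_mutation (original_seq : String) (mutated_seq : String) : Bool :=
  if PySem.Str.len original_seq != PySem.Str.len mutated_seq then false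
  else
    -- substitutions = []; for i, (orig, mut) in enumerate(zip(...)): if orig != mut: append i
    let subs : List Int :=
      (PySem.List.enumerate (original_seq.toList.zip mutated_seq.toList)).foldl
        (fun acc p => if p.2.1 != p.2.2 then acc ++ [p.1] else acc) []
    if subs.length != 2 then false
    else
      let pos1 := PySem.List.pyGetD subs 0 0   -- subs[0]; in range, subs has length 2
      let pos2 := PySem.List.pyGetD subs 1 0   -- subs[1]
      if PySem.Str.len original_seq == 3 && pos1 == 0 && pos2 == 2 then
        -- original_seq[1] == mutated_seq[1]; index 1 in range since the length is 3
        PySem.List.pyGet? original_seq.toList 1 == PySem.List.pyGet? mutated_seq.toList 1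
      else
        -- conserved_count loop over range(pos1 + 1, pos2); all indices are in range
        let conserved : Int :=
          (PySem.List.pyRange (pos1 + 1) pos2).foldl
            (fun acc i =>
              if PySem.List.pyGet? original_seq.toList i == PySem.List.pyGet? mutated_seq.toList i
              then acc + 1 else acc) 0
        conserved == 1

-- ===== PORT B =====
def detect_hot_mutation_alt (original_seq : String) (mutated_seq : String) : Bool :=
  if PySem.Str.len original_seq != PySem.Str.len mutated_seq then false
  else
    -- diffs = [i for i, (a, b) in enumerate(zip(...)) if a != b]
    let diffs : List Int :=
      (PySem.List.enumerate (original_seq.toList.zip mutated_seq.toList)).filterMap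
        (fun p => if p.2.1 != p.2.2 then some p.1 else none)
    -- len(diffs) == 2 and diffs[1] - diffs[0] == 2  (indices in range when evaluated)
    diffs.length == 2 && (PySem.List.pyGetD diffs 1 0 - PySem.List.pyGetD diffs 0 0 == 2)

-- ===== PRECONDITION & SPEC =====
def Spec_detect_hot_mutation (original_seq : String) (mutated_seq : String) (out : Bool) : Prop := out = detect_hot_mutation_alt original_seq mutated_seq
instance (original_seq : String) (mutated_seq : String) (out : Bool) : Decidable (Spec_detect_hot_mutation original_seq mutated_seq out) := by unfold Spec_detect_hot_mutation; infer_instance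

-- ===== CLAIM (what is proved, stated in full; the proofs are below) =====
def Claim_equal_detect_hot_mutation : Prop := ∀ (original_seq : String) (mutated_seq : String), Dom_detect_hot_mutation original_seq mutated_seq → Spec_detect_hot_mutation original_seq mutated_seq (detect_hot_mutation original_seq mutated_seq)

-- ===== LEMMAS AND PROOFS =====

-- the comprehension shape of B's port is map-after-filter
theorem filterMap_if_eq_map_filter (p : ℤ × Char × Char → Bool) (f : ℤ × Char × Char → ℤ)
    (l : List (ℤ × Char × Char)) :
    l.filterMap (fun q => if p q then some (f q) else none) = (l.filter p).map f := by
  induction l with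
  | nil => rfl
  | cons x xs ih => by_cases h : p x <;> simp [h, ih]

-- the common diff-index pass, characterised as a filter of the index range
theorem enum_zip_diffs (xs : List Char) : ∀ (ys : List Char) (s : ℕ),
    ((PySem.List.enumerate (xs.zip ys) (s : ℤ)).filter (fun p => p.2.1 != p.2.2)).map (·.1)
    = ((List.range (min xs.length ys.length)).filter (fun k => xs[k]? != ys[k]?)).map
        (fun k => ((s + k : ℕ) : ℤ)) := by
  induction xs with
  | nil => intro ys s; simp
  | cons x xs ih =>
    intro ys s
    cases ys with
    | nil => simp
    | cons y ys =>
      have hcast : ((s : ℤ) + 1) = ((s + 1 : ℕ) : ℤ) := by push_cast; ring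
      have hsome : ((some x != some y) : Bool) = (x != y) := by
        cases hxy : x == y <;> simp [bne, hxy]
      have ihh := ih ys (s + 1)
      rw [List.zip_cons_cons, PySem.List.enumerate_cons]
      simp only [List.length_cons, Nat.succ_min_succ, List.range_succ_eq_map,
        List.filter_cons, List.getElem?_cons_zero, List.getElem?_cons_succ,
        List.filter_map, Function.comp_def]
      rw [hcast, hsome]
      by_cases h : (x != y) = true
      · simp only [h, if_true, List.map_cons, ihh, List.map_map]
        refine List.cons_eq_cons.mpr ⟨by simp, ?_⟩
        apply List.map_congr_left; intro k _; simp only [Function.comp_apply]; push_cast; ring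
      · simp only [h, if_false, Bool.false_eq_true, ihh, List.map_map]
        apply List.map_congr_left; intro k _; simp only [Function.comp_apply]; push_cast; ring

theorem enum_zip_diffs0 (xs ys : List Char) :
    ((PySem.List.enumerate (xs.zip ys) 0).filter (fun p => p.2.1 != p.2.2)).map (·.1)
    = ((List.range (min xs.length ys.length)).filter (fun k => xs[k]? != ys[k]?)).map
        (fun (k : ℕ) => (k : ℤ)) := by
  have h := enum_zip_diffs xs ys 0
  simp only [Nat.cast_zero, Nat.zero_add] at h
  exact h

theorem foldl_len (l : List ℤ) (c : ℤ) : l.foldl (fun acc _ => acc + 1) c = c + l.length := by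
  induction l generalizing c with
  | nil => simp
  | cons x xs ih => simp [List.foldl_cons, ih]; ring

-- ===== VERDICT (by name: the statement is the Claim_ definition above) =====
theorem detect_hot_mutation_spec : Claim_equal_detect_hot_mutation := by
  intro o m _
  unfold Spec_detect_hot_mutation detect_hot_mutation detect_hot_mutation_alt
  by_cases hne : (PySem.Str.len o != PySem.Str.len m) = true
  · rw [if_pos hne, if_pos hne]
  · rw [Bool.not_eq_true] at hne
    simp only [hne, Bool.false_eq_true, if_false]
    have hlen : o.toList.length = m.toList.length := by
      simp only [PySem.Str.len_eq, bne_eq_false_iff_eq] at hne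
      exact_mod_cast hne
    simp only [PySem.List.foldl_append_if, filterMap_if_eq_map_filter, List.nil_append,
      enum_zip_diffs0, hlen, min_self]
    set D := (List.range m.toList.length).filter (fun k => o.toList[k]? != m.toList[k]?) with hDdef
    by_cases hl : D.length = 2
    · obtain ⟨a, b, hD⟩ := List.length_eq_two.mp hl
      have hab : a < b := by
        have hp : D.Pairwise (· < ·) := List.Pairwise.filter _ List.pairwise_lt_range
        rw [hD, List.pairwise_cons] at hp; exact hp.1 b (by simp)
      have hbn : b < m.toList.length := by
        have : b ∈ D := by rw [hD]; simp
        exact List.mem_range.mp (List.mem_filter.mp this).1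
      have hbetween : ∀ k, a < k → k < b → o.toList[k]? = m.toList[k]? := by
        intro k hka hkb
        by_contra hne'
        have hk : k ∈ D := by
          apply List.mem_filter.mpr
          exact ⟨List.mem_range.mpr (by omega), by simpa using hne'⟩
        rw [hD] at hk
        simp at hk
        omega
      rw [hD]
      simp only [List.map_cons, List.map_nil, List.length_cons, List.length_nil]
      have hget0 : PySem.List.pyGetD [(a : ℤ), (b : ℤ)] 0 0 = (a : ℤ) := by
        simp [PySem.List.pyGetD, PySem.List.pyIdx?, PySem.List.pyGet?]
      have hget1 : PySem.List.pyGetD [(a : ℤ), (b : ℤ)] 1 0 = (b : ℤ) := by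
        simp [PySem.List.pyGetD, PySem.List.pyIdx?, PySem.List.pyGet?]
      rw [hget0, hget1]
      by_cases hc : (PySem.Str.len o == 3 && ((a : ℤ) == 0) && ((b : ℤ) == 2)) = true
      · -- special length-3 branch: both sides are true
        simp only [Bool.and_eq_true, beq_iff_eq] at hc
        have ha0 : a = 0 := by exact_mod_cast hc.1.2
        have hb2 : b = 2 := by exact_mod_cast hc.2
        have h3 : ((o.length : ℤ)) = 3 := by
          have h := hc.1.1; rw [PySem.Str.len_eq] at h; simpa using h
        have hm : o.toList[1]? = m.toList[1]? := hbetween 1 (by omega) (by omega)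
        rw [show (1 : ℤ) = ((1 : ℕ) : ℤ) by norm_num, PySem.List.pyGet?_natCast,
          PySem.List.pyGet?_natCast]
        simp [hm, ha0, hb2, h3]
      · -- generic branch: the counting loop counts b - a - 1 conserved bases
        rw [Bool.not_eq_true] at hc
        simp only [hc, Bool.false_eq_true, if_false]
        have hcong := PySem.List.foldl_congr_mem (PySem.List.pyRange ((a : ℤ) + 1) (b : ℤ))
          (fun acc i =>
            if PySem.List.pyGet? o.toList i == PySem.List.pyGet? m.toList i
            then acc + 1 else acc)
          (fun acc _ => acc + 1) (0 : ℤ) ?_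
        · rw [hcong, foldl_len, PySem.List.length_pyRange_one]
          rw [show ((0 + 1 + 1 : ℕ) != 2) = false by decide,
            show ((0 + 1 + 1 : ℕ) == 2) = true by decide]
          simp only [Bool.false_eq_true, if_false, Bool.true_and, zero_add]
          rw [Bool.eq_iff_iff]
          simp only [beq_iff_eq]
          omega
        · intro acc i hi
          obtain ⟨h1, h2⟩ := PySem.List.mem_pyRange_one.mp hi
          have hi0 : 0 ≤ i := by omega
          have hik : i = ((i.toNat : ℕ) : ℤ) := (Int.toNat_of_nonneg hi0).symm
          have heq2 : PySem.List.pyGet? o.toList i = PySem.List.pyGet? m.toList i := by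
            rw [hik, PySem.List.pyGet?_natCast, PySem.List.pyGet?_natCast]
            exact hbetween i.toNat (by omega) (by omega)
          simp [heq2]
    · -- not exactly two substitutions: both sides are false
      have hmapl : (D.map (fun (k : ℕ) => (k : ℤ))).length = D.length := List.length_map ..
      rw [hmapl]
      simp [hl]
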